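-- pv_equiv track=rewrite | github.com/CSharperMantle/mozilla-firefox-dev | js/src/frontend/GenerateReservedWords.py | split_list_per_column
-- ===== SOURCE A (Python) =====
-- def split_list_per_column(reserved_word_list, column):
--     assert len(reserved_word_list) != 0
--
--     column_dict = {}
--     for item in reserved_word_list:
--         index, word = item
--         per_column = column_dict.setdefault(word[column], [])
--         per_column.append(item)
--
--     return sorted(column_dict.items())
-- ===== SOURCE B (Python) =====
-- def split_list_per_column(reserved_word_list, column):
--     assert len(reserved_word_list) != 0
--
--     keys = sorted({word[column] for _, word in reserved_word_list})
--     return [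
--         (key, [item for item in reserved_word_list if item[1][column] == key])
--         for key in keys
--     ]
-- ===== Notes on version B (the rewrite author's own statement) =====
-- stated objective: alternative
-- what changed: B drops the dict entirely: it sorts the distinct column characters once and builds each group by filtering the input list per key, instead of A's incremental dict grouping followed by sorting the dict items.
import Mathlib
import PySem

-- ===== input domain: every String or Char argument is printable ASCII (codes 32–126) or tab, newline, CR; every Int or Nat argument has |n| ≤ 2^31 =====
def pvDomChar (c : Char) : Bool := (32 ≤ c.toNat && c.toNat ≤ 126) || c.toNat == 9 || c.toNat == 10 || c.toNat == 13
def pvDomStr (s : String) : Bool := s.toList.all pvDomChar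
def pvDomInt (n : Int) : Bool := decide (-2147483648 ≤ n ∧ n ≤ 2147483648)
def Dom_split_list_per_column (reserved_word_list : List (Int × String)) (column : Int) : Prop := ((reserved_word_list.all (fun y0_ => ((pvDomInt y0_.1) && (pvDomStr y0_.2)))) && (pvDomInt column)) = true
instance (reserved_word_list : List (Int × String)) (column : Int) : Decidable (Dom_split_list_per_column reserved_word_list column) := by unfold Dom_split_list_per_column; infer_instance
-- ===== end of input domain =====

-- B replaces A's dict-grouping-then-sort-items with sorted-distinct-keys + a per-key filter (alternative decomposition, no dict).


-- Shared helper: Python's `word[column]` as a one-character STRING (the dict key / sort key both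
-- Pythons compute per item).  The `none` branch is Python's IndexError, excluded by Pre_; the ""
-- default is never reached on inputs satisfying Pre_.
def pvColKey (column : Int) (it : Int × String) : String :=
  match PySem.Str.pyGet? it.2 column with
  | some c => String.mk [c]
  | none => ""

-- ===== PORT A =====
-- `per_column = column_dict.setdefault(word[column], []); per_column.append(item)` is exactly
-- `d[k] = d.get(k, []) + [item]`, i.e. Dict.modify with default [].
-- A's final `sorted(column_dict.items())` compares (str, list) tuples; dict keys are unique, so the
-- comparison is decided by the first component — ported as a sort keyed on `.1` (exact here).
def split_list_per_column (reserved_word_list : List (Int × String)) (column : Int) : List (String × (List (Int × String))) :=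
  let column_dict := reserved_word_list.foldl
    (fun d item => d.modify (pvColKey column item) [] (fun per_column => per_column ++ [item]))
    PySem.Dict.empty
  PySem.List.sorted column_dict.items (fun p => p.1) false

-- ===== PORT B =====
def split_list_per_column_alt (reserved_word_list : List (Int × String)) (column : Int) : List (String × (List (Int × String))) :=
  let keys := PySem.List.sorted (PySem.Set.ofList (reserved_word_list.map (pvColKey column))) (fun k => k) false
  keys.map (fun key => (key, reserved_word_list.filter (fun item => pvColKey column item == key)))

-- ===== PRECONDITION & SPEC =====
-- Pre_ excludes exactly where the Python raises: the empty list (assert) and any word for which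
-- word[column] is an IndexError.
def Pre_split_list_per_column (reserved_word_list : List (Int × String)) (column : Int) : Prop :=
  reserved_word_list ≠ [] ∧ ∀ it ∈ reserved_word_list, PySem.Raise.InRange it.2.toList.length column
instance (reserved_word_list : List (Int × String)) (column : Int) : Decidable (Pre_split_list_per_column reserved_word_list column) := by unfold Pre_split_list_per_column; infer_instance

def pvWitness_split_list_per_column : (List (Int × String)) × Int := ([(0, "if"), (1, "in"), (2, "do")], 0)

def Spec_split_list_per_column (reserved_word_list : List (Int × String)) (column : Int) (out : List (String × (List (Int × String)))) : Prop := out = split_list_per_column_alt reserved_word_list column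
instance (reserved_word_list : List (Int × String)) (column : Int) (out : List (String × (List (Int × String)))) : Decidable (Spec_split_list_per_column reserved_word_list column out) := by unfold Spec_split_list_per_column; infer_instance

-- ===== CLAIM (what is proved, stated in full; the proofs are below) =====
def Claim_equal_split_list_per_column : Prop := ∀ (reserved_word_list : List (Int × String)) (column : Int), Dom_split_list_per_column reserved_word_list column → Pre_split_list_per_column reserved_word_list column → Spec_split_list_per_column reserved_word_list column (split_list_per_column reserved_word_list column)

-- ===== LEMMAS AND PROOFS =====

-- A's dict after the loop, characterised: its items are the first-occurrence-ordered distinct keys,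
-- each paired with the filter of the whole list on that key.
lemma dict_items_char (l : List (Int × String)) (column : Int) :
    (l.foldl (fun d item => d.modify (pvColKey column item) [] (fun per_column => per_column ++ [item])) PySem.Dict.empty).items
      = (PySem.Set.ofList (l.map (pvColKey column))).map
          (fun k => (k, l.filter (fun item => pvColKey column item == k))) := by
  set key := pvColKey column with hkey
  have hnodup : (l.foldl (fun d item => d.modify (key item) [] (fun pc => pc ++ [item])) PySem.Dict.empty).keys.Nodup :=
    PySem.Dict.nodup_keys_foldl_modify_key l key [] (fun d x pc => pc ++ [x]) PySem.Dict.empty (by simp)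
  have hkeys : (l.foldl (fun d item => d.modify (key item) [] (fun pc => pc ++ [item])) PySem.Dict.empty).keys
      = PySem.Set.ofList (l.map key) := by
    rw [PySem.Dict.keys_foldl_modify_key l key [] (fun d x pc => pc ++ [x]) PySem.Dict.empty,
        PySem.Dict.keys_empty, PySem.Set.ofList_eq_foldl]
    rfl
  rw [PySem.Dict.items_eq_map_keys _ hnodup [], hkeys]
  refine List.map_congr_left (fun k _ => ?_)
  have hfold : (l.foldl (fun d item => d.modify (key item) [] (fun pc => pc ++ [item])) PySem.Dict.empty)
      = ((l.map (fun item => (key item, item))).foldl (fun d p => d.modify p.1 [] (fun pc => pc ++ [p.2])) PySem.Dict.empty) := by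
    rw [List.foldl_map]
  rw [hfold, PySem.Dict.getD_foldl_modify_append, PySem.Dict.getD_empty, List.filter_map,
      List.map_map]
  simp [Function.comp_def]

theorem split_list_per_column_spec : Claim_equal_split_list_per_column := by
  intro l column _ _
  show PySem.List.sorted (l.foldl (fun d item => d.modify (pvColKey column item) [] (fun per_column => per_column ++ [item])) PySem.Dict.empty).items (fun p => p.1) false = _
  rw [dict_items_char l column]
  exact PySem.List.sorted_eq_of_perm_of_pairwise_lt _ _ _
    ((PySem.List.sorted_perm _ _ _).map _)
    (by
      have := PySem.List.sorted_ofList_pairwise_lt (l.map (pvColKey column))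
      exact (List.pairwise_map).mpr this)
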